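-- pv_equiv track=rewrite | github.com/vbetsch/undercover | src/core/Inspector.py | sameFirstLetterWithoutCase
-- ===== SOURCE A (Python) =====
-- def sameFirstLetterWithoutCase(words):
--     first_letters = []
--     for word in words:
--         first_letters.append(word[0])
--     if len(first_letters) != len(set(first_letters)):
--         return True
--     else:
--         return False
-- ===== SOURCE B (Python) =====
-- def sameFirstLetterWithoutCase(words):
--     firsts = sorted(word[0] for word in words)
--     for a, b in zip(firsts, firsts[1:]):
--         if a == b:
--             return True
--     return False
-- ===== Notes on version B (the rewrite author's own statement) =====
-- stated objective: alternative
-- what changed: Instead of materialising all first letters and comparing the list's length with its set's length, B sorts the first letters and scans adjacent pairs for an equal neighbour (sort-then-scan duplicate detection).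
import Mathlib
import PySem

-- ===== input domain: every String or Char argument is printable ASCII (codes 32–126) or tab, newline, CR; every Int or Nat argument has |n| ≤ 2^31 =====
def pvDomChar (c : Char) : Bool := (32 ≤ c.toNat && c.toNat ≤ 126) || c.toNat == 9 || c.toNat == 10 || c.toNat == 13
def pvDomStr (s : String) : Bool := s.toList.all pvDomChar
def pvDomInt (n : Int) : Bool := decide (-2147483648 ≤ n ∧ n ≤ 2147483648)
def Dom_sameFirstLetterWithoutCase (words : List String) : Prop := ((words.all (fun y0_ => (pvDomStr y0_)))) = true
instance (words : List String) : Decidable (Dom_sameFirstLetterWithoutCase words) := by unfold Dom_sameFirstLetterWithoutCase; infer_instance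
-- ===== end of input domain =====

-- B replaces A's "length of list vs length of set" duplicate test by sorting the
-- first letters and scanning adjacent pairs for equality (alternative algorithm).


-- ===== PORT A =====
-- word[0] is total under Pre_ (every word nonempty): pyGet? returns some there, getD supplies a dummy never used.
def sameFirstLetterWithoutCase (words : List String) : Bool :=
  let first_letters := words.foldl (fun acc word => acc ++ [(PySem.Str.pyGet? word 0).getD ' ']) []
  if first_letters.length ≠ (PySem.Set.ofList first_letters).length then true else false

-- ===== PORT B =====
-- the for-loop over zip(firsts, firsts[1:]) scanning for an equal adjacent pair
def pvAdjEqScan : List Char → Bool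
  | a :: b :: t => if a == b then true else pvAdjEqScan (b :: t)
  | _ => false

def sameFirstLetterWithoutCase_alt (words : List String) : Bool :=
  let firsts := PySem.List.sorted (words.map (fun word => (PySem.Str.pyGet? word 0).getD ' ')) (fun c => c) false
  pvAdjEqScan firsts

-- ===== PRECONDITION & SPEC =====
-- Pre_ excludes exactly the inputs containing an empty word, on which Python A raises IndexError (word[0]).
def Pre_sameFirstLetterWithoutCase (words : List String) : Prop := ∀ w ∈ words, w ≠ ""
instance (words : List String) : Decidable (Pre_sameFirstLetterWithoutCase words) := by unfold Pre_sameFirstLetterWithoutCase; infer_instance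
def pvWitness_sameFirstLetterWithoutCase : List String := ["apple", "Ant", "bee"]

def Spec_sameFirstLetterWithoutCase (words : List String) (out : Bool) : Prop := out = sameFirstLetterWithoutCase_alt words
instance (words : List String) (out : Bool) : Decidable (Spec_sameFirstLetterWithoutCase words out) := by unfold Spec_sameFirstLetterWithoutCase; infer_instance

-- ===== CLAIM (what is proved, stated in full; the proofs are below) =====
def Claim_equal_sameFirstLetterWithoutCase : Prop := ∀ (words : List String), Dom_sameFirstLetterWithoutCase words → Pre_sameFirstLetterWithoutCase words → Spec_sameFirstLetterWithoutCase words (sameFirstLetterWithoutCase words)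

-- ===== LEMMAS AND PROOFS =====

lemma pvFoldl_append_map (f : String → Char) (words : List String) (acc : List Char) :
    words.foldl (fun acc w => acc ++ [f w]) acc = acc ++ words.map f := by
  induction words generalizing acc with
  | nil => simp
  | cons w t ih => simp [List.foldl, ih]

lemma pvLenOfList_eq_iff (l : List Char) :
    (PySem.Set.ofList l).length = l.length ↔ l.Nodup := by
  have hn : (PySem.Set.ofList l).Nodup := PySem.Set.nodup_ofList l
  have hfin : (PySem.Set.ofList l).toFinset = l.toFinset := by
    ext x; simp [List.mem_toFinset, PySem.Set.mem_ofList]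
  have hlen : (PySem.Set.ofList l).length = l.toFinset.card := by
    rw [← hfin, List.toFinset_card_of_nodup hn]
  rw [hlen]
  constructor
  · intro h
    have := Multiset.toFinset_card_eq_card_iff_nodup (m := (l : Multiset Char))
    simpa using this.mp (by simpa using h)
  · intro h
    simpa using List.toFinset_card_of_nodup h

lemma pvAdjEqScan_eq_false_iff (l : List Char) :
    pvAdjEqScan l = false ↔ l.IsChain (· ≠ ·) := by
  induction l with
  | nil => simp [pvAdjEqScan, List.isChain_nil]
  | cons a t ih =>
    cases t with
    | nil => simp [pvAdjEqScan, List.isChain_singleton]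
    | cons b u =>
      by_cases hab : a = b
      · simp [pvAdjEqScan, hab, List.isChain_cons_cons]
      · simp [pvAdjEqScan, hab, List.isChain_cons_cons, ih]

lemma pvChain'_lt (l : List Char) (hle : l.IsChain (· ≤ ·)) (hne : l.IsChain (· ≠ ·)) :
    l.IsChain (· < ·) := by
  induction l with
  | nil => exact List.isChain_nil
  | cons a t ih =>
    cases t with
    | nil => exact List.isChain_singleton a
    | cons b u =>
      rw [List.isChain_cons_cons] at hle hne ⊢
      exact ⟨lt_of_le_of_ne hle.1 hne.1, ih hle.2 hne.2⟩

lemma pvAdjEqScan_sorted (l : List Char) :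
    pvAdjEqScan (PySem.List.sorted l (fun c => c) false) = true ↔ ¬ l.Nodup := by
  set s := PySem.List.sorted l (fun c => c) false with hs
  have hperm : s.Perm l := PySem.List.sorted_perm l (fun c => c) false
  have hpw : s.Pairwise (fun a b => (fun c => c) a ≤ (fun c => c) b) :=
    PySem.List.sorted_pairwise l (fun c => c)
  constructor
  · intro h hnd
    have hnds : s.Nodup := (hperm.nodup_iff).mpr hnd
    have hchain : s.IsChain (· ≠ ·) := hnds.isChain
    rw [← pvAdjEqScan_eq_false_iff] at hchain
    simp [h] at hchain
  · intro h
    by_contra hfalse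
    have hf : pvAdjEqScan s = false := by
      cases hv : pvAdjEqScan s with
      | false => rfl
      | true => exact absurd hv hfalse
    have hchain : s.IsChain (· ≠ ·) := (pvAdjEqScan_eq_false_iff s).mp hf
    have hlt : s.IsChain (· < ·) := pvChain'_lt s (hpw.isChain) hchain
    have hpwlt : s.Pairwise (· < ·) := List.isChain_iff_pairwise.mp hlt
    have hnds : s.Nodup := hpwlt.imp ne_of_lt
    exact h ((hperm.nodup_iff).mp hnds)

-- ===== VERDICT (by name: the statement is the Claim_ definition above) =====
theorem sameFirstLetterWithoutCase_spec : Claim_equal_sameFirstLetterWithoutCase := by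
  intro words _ _
  unfold Spec_sameFirstLetterWithoutCase sameFirstLetterWithoutCase sameFirstLetterWithoutCase_alt
  set f : String → Char := fun word => (PySem.Str.pyGet? word 0).getD ' ' with hf
  rw [pvFoldl_append_map f words []]
  simp only [List.nil_append]
  set l := words.map f with hl
  by_cases hnd : l.Nodup
  · have h1 : (PySem.Set.ofList l).length = l.length := (pvLenOfList_eq_iff l).mpr hnd
    have h2 : ¬ pvAdjEqScan (PySem.List.sorted l (fun c => c) false) = true := by
      rw [pvAdjEqScan_sorted]; exact not_not_intro hnd
    simp [h1, Bool.not_eq_true] at *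
    simp [h2]
  · have h1 : (PySem.Set.ofList l).length ≠ l.length := by
      rw [Ne, pvLenOfList_eq_iff]; exact hnd
    have h2 : pvAdjEqScan (PySem.List.sorted l (fun c => c) false) = true :=
      (pvAdjEqScan_sorted l).mpr hnd
    simp [h2, Ne]
    omega
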